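-- pv_equiv track=rewrite | github.com/mattzjack/112temp | s18-rec7soln.py | isEN
-- ===== SOURCE A (Python) =====
-- import string, copy, math, random
--
-- def isPS(n):
--     for i in range(math.ceil(n ** 0.5) + 3):
--         if i ** 2 == n: return True
--     return False
--
-- def getFactors(n):
--     factors = []
--     for i in range(1, n + 1):
--         if n % i == 0:
--             factors.append(i)
--     return factors
--
-- def isEN(n):
--     if n <= 0 or n % 2 == 1: return False
--     factors = getFactors(n)
--     if len(factors) < 10: return False
--     odds = []
--     evens = []
--     for f in factors:
--         if f % 2 == 0:
--             if f != n: evens.append(f)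
--         else:
--             odds.append(f)
--     if sum(odds) <= sum(evens): return False
--     for f in factors:
--         if f != 1 and f % 2 == 1 and isPS(f):
--             return False
--     return True
-- ===== SOURCE B (Python) =====
-- import math
--
-- def isEN(n):
--     if n <= 0 or n % 2 == 1:
--         return False
--     cnt = 0
--     odd_sum = 0
--     even_sum = 0
--     ok = True
--     r = math.isqrt(n)
--     for i in range(1, r + 1):
--         if n % i == 0:
--             j = n // i
--             for d in ([i] if i == j else [i, j]):
--                 cnt += 1
--                 if d % 2 == 0:
--                     if d != n:
--                         even_sum += d
--                 else:
--                     odd_sum += d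
--                     if d != 1 and math.isqrt(d) ** 2 == d:
--                         ok = False
--     return cnt >= 10 and odd_sum > even_sum and ok
-- ===== Notes on version B (the rewrite author's own statement) =====
-- stated objective: faster
-- what changed: Replaces the O(n) full divisor scan (plus a per-divisor square-test loop) by one O(sqrt(n)) pass that enumerates divisors in pairs (i, n//i) and aggregates count, odd/even sums and the odd-square check in a single accumulator, using math.isqrt for the square test.
import Mathlib
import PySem

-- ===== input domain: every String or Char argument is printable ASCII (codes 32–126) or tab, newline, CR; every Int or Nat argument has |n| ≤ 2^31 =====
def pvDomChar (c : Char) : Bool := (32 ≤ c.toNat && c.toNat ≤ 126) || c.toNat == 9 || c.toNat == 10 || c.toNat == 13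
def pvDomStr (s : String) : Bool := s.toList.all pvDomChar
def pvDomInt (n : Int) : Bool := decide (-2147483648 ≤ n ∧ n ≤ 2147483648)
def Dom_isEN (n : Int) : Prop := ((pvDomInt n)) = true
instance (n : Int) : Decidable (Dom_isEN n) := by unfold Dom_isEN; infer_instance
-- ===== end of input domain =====

-- B replaces A's full 1..n divisor scan (and per-divisor square-test loop) by a single pass
-- over divisor pairs (i, n//i) for i up to isqrt(n), aggregating count, odd/even sums and the
-- odd-square check in one accumulator (objective: faster by algorithm change).


-- ===== PORT A =====
-- math.ceil(n ** 0.5), ported by hand: for the 0 ≤ n ≤ 2^31 inputs isPS receives, n < 2^52,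
-- so the float sqrt of a perfect square is exact and ceil(n**0.5) = this integer ceiling;
-- on non-squares a ±1 rounding of the bound cannot change isPS's result (the loop overshoots by +3).
def ceilSqrtF (n : Int) : Int :=
  let r : Int := (Nat.sqrt n.toNat : Int)
  if r * r = n then r else r + 1

def isPS (n : Int) : Bool :=
  (PySem.List.pyRange 0 (ceilSqrtF n + 3) 1).any (fun i => i ^ 2 == n)

def getFactors (n : Int) : List Int :=
  (PySem.List.pyRange 1 (n + 1) 1).foldl
    (fun acc i => if PySem.Int.mod n i == 0 then acc ++ [i] else acc) []

def isEN (n : Int) : Bool :=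
  if n ≤ 0 ∨ PySem.Int.mod n 2 = 1 then false
  else
    let factors := getFactors n
    if factors.length < 10 then false
    else
      let oe := factors.foldl
        (fun (p : List Int × List Int) f =>
          if PySem.Int.mod f 2 == 0 then
            (if f != n then (p.1, p.2 ++ [f]) else p)
          else (p.1 ++ [f], p.2)) ([], [])
      if oe.1.sum ≤ oe.2.sum then false
      else !(factors.any (fun f => f != 1 && PySem.Int.mod f 2 == 1 && isPS f))

-- ===== PORT B =====
-- math.isqrt(d) ** 2 == d  (exact: math.isqrt is the integer square root, Nat.sqrt here)
def sqCheck (d : Int) : Bool := ((Nat.sqrt d.toNat : Int)) ^ 2 == d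

-- the body of Source B's inner `for d in ...` loop over the state (cnt, odd_sum, even_sum, ok)
def pairStep (n : Int) (st : Int × Int × Int × Bool) (d : Int) : Int × Int × Int × Bool :=
  let cnt := st.1 + 1
  if PySem.Int.mod d 2 == 0 then
    (if d != n then (cnt, st.2.1, st.2.2.1 + d, st.2.2.2) else (cnt, st.2.1, st.2.2.1, st.2.2.2))
  else
    (cnt, st.2.1 + d, st.2.2.1, st.2.2.2 && !(d != 1 && sqCheck d))

def isEN_alt (n : Int) : Bool :=
  if n ≤ 0 ∨ PySem.Int.mod n 2 = 1 then false
  else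
    let r : Int := (Nat.sqrt n.toNat : Int)
    let st := (PySem.List.pyRange 1 (r + 1) 1).foldl
      (fun st i =>
        if PySem.Int.mod n i == 0 then
          let j := PySem.Int.floordiv n i
          (if i = j then [i] else [i, j]).foldl (pairStep n) st
        else st) (0, 0, 0, true)
    decide (10 ≤ st.1) && decide (st.2.2.1 < st.2.1) && st.2.2.2

-- ===== PRECONDITION & SPEC =====
def Spec_isEN (n : Int) (out : Bool) : Prop := out = isEN_alt n
instance (n : Int) (out : Bool) : Decidable (Spec_isEN n out) := by unfold Spec_isEN; infer_instance

-- ===== CLAIM (what is proved, stated in full; the proofs are below) =====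
def Claim_equal_isEN : Prop := ∀ (n : Int), Dom_isEN n → Spec_isEN n (isEN n)

-- ===== LEMMAS AND PROOFS =====

-- predicates shared by both characterizations
def pOdd : Int → Bool := fun d => !(PySem.Int.mod d 2 == 0)
def pEven (n : Int) : Int → Bool := fun d => (PySem.Int.mod d 2 == 0) && (d != n)
def pBadB : Int → Bool := fun d => pOdd d && (d != 1 && sqCheck d)
def pBadA : Int → Bool := fun f => f != 1 && PySem.Int.mod f 2 == 1 && isPS f

-- the block of divisors contributed by index i in B's loop
def blk (n i : Int) : List Int :=
  if PySem.Int.mod n i == 0 then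
    (if i = PySem.Int.floordiv n i then [i] else [i, PySem.Int.floordiv n i])
  else []

lemma getFactors_eq_filter (n : Int) :
    getFactors n = (PySem.List.pyRange 1 (n + 1) 1).filter (fun i => PySem.Int.mod n i == 0) := by
  unfold getFactors
  simpa using PySem.List.foldl_append_if (fun i => PySem.Int.mod n i == 0) id
    (PySem.List.pyRange 1 (n + 1) 1) []

lemma oe_char (n : Int) (l : List Int) (p : List Int × List Int) :
    l.foldl (fun (p : List Int × List Int) f =>
      if PySem.Int.mod f 2 == 0 then
        (if f != n then (p.1, p.2 ++ [f]) else p)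
      else (p.1 ++ [f], p.2)) p
    = (p.1 ++ l.filter pOdd, p.2 ++ l.filter (pEven n)) := by
  induction l generalizing p with
  | nil => simp
  | cons x xs ih =>
    simp only [List.foldl_cons, List.filter_cons]
    cases hb : (PySem.Int.mod x 2 == 0) <;> cases hb2 : (x != n) <;>
      simp only [hb, hb2, Bool.false_eq_true, if_false, if_true, ih, pOdd, pEven,
        Bool.not_false, Bool.not_true, Bool.false_and, Bool.true_and] <;>
      simp

lemma pairStep_char (n : Int) (l : List Int) (st : Int × Int × Int × Bool) :
    l.foldl (pairStep n) st
    = (st.1 + l.length, st.2.1 + (l.filter pOdd).sum,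
       st.2.2.1 + (l.filter (pEven n)).sum, st.2.2.2 && !(l.any pBadB)) := by
  induction l generalizing st with
  | nil => simp
  | cons x xs ih =>
    simp only [List.foldl_cons, List.filter_cons, List.any_cons]
    cases hb : (PySem.Int.mod x 2 == 0) <;> cases hb2 : (x != n) <;>
      cases hb3 : (x != 1 && sqCheck x) <;>
      simp only [pairStep, hb, hb2, hb3, Bool.false_eq_true, if_false, if_true, ih, pOdd, pEven,
        pBadB, Bool.not_false, Bool.not_true, Bool.false_and, Bool.and_false,
        Bool.and_true, Bool.false_or, Bool.true_or] <;>
      (refine Prod.ext ?_ (Prod.ext ?_ (Prod.ext ?_ ?_)) <;> simp <;> ring)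


lemma alt_fold_eq_blk (n : Int) (r : Int) (st : Int × Int × Int × Bool) :
    (PySem.List.pyRange 1 (r + 1) 1).foldl
      (fun st i =>
        if PySem.Int.mod n i == 0 then
          let j := PySem.Int.floordiv n i
          (if i = j then [i] else [i, j]).foldl (pairStep n) st
        else st) st
    = (((PySem.List.pyRange 1 (r + 1) 1).map (blk n)).flatten).foldl (pairStep n) st := by
  rw [List.foldl_flatten, List.foldl_map]
  congr 1
  funext st i
  by_cases h : PySem.Int.mod n i = 0 <;> simp [blk, h]

lemma mem_blk {n i d : Int} (hi : 0 < i) :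
    d ∈ blk n i ↔ i ∣ n ∧ (d = i ∨ d = n / i) := by
  unfold blk
  rw [PySem.Int.floordiv_eq_ediv_of_pos hi]
  by_cases h : i ∣ n
  · have hm : (PySem.Int.mod n i == 0) = true := by
      simp [PySem.Int.mod_eq_zero_iff_dvd n i, h]
    rw [if_pos hm]
    by_cases h2 : i = n / i
    · rw [if_pos h2]
      simp only [List.mem_singleton]
      constructor
      · rintro rfl; exact ⟨h, Or.inl rfl⟩
      · rintro ⟨-, (rfl | rfl)⟩; rfl; exact h2.symm
    · rw [if_neg h2]
      simp [h]
  · have hm : ¬ (PySem.Int.mod n i == 0) = true := by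
      simp [PySem.Int.mod_eq_zero_iff_dvd n i, h]
    rw [if_neg hm]
    simp [h]

lemma divisor_pair {n d : Int} (hn : 0 < n) (hd : d ∣ n) (h1 : 0 < d) :
    0 < n / d ∧ n / d ≤ n ∧ (n / d) ∣ n ∧ d * (n / d) = n ∧ n / (n / d) = d := by
  obtain ⟨c, hc⟩ := hd
  have hcd : n / d = c := by rw [hc, Int.mul_ediv_cancel_left _ (by omega)]
  have hc0 : 0 < c := by nlinarith
  refine ⟨by omega, by nlinarith, ⟨d, by rw [hcd, hc]; ring⟩, by rw [hcd, hc], ?_⟩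
  rw [hcd, hc, mul_comm, Int.mul_ediv_cancel_left _ (by omega)]

lemma sqrt_bounds (n : Int) (hn : 0 < n) :
    (Nat.sqrt n.toNat : Int) * (Nat.sqrt n.toNat : Int) ≤ n ∧
      n < ((Nat.sqrt n.toNat : Int) + 1) * ((Nat.sqrt n.toNat : Int) + 1) := by
  have h2 : ((n.toNat : Int)) = n := Int.toNat_of_nonneg hn.le
  have hle : ((Nat.sqrt n.toNat ^ 2 : Nat) : Int) ≤ ((n.toNat : Nat) : Int) := by
    exact_mod_cast Nat.sqrt_le' n.toNat
  have hlt : ((n.toNat : Nat) : Int) < (((Nat.sqrt n.toNat + 1) ^ 2 : Nat) : Int) := by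
    exact_mod_cast Nat.lt_succ_sqrt' n.toNat
  push_cast at hle hlt
  constructor <;> nlinarith [hle, hlt, h2]

lemma blk_disjoint {n r i i' : Int} (hn : 0 < n) (hr2 : r * r ≤ n)
    (h1 : 1 ≤ i) (hlt : i < i') (h2 : i' ≤ r) : List.Disjoint (blk n i) (blk n i') := by
  intro d hd hd'
  have hi : 0 < i := by omega
  have hi' : 0 < i' := by omega
  rw [mem_blk hi] at hd
  rw [mem_blk hi'] at hd'
  obtain ⟨hdvd, hcase⟩ := hd
  obtain ⟨hdvd', hcase'⟩ := hd'
  have dp := divisor_pair hn hdvd hi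
  have dp' := divisor_pair hn hdvd' hi'
  rcases hcase with rfl | rfl <;> rcases hcase' with h | h
  · omega
  · -- i = n / i', so n = i' * i with i < i' ≤ r
    have hmul : i' * (n / i') = n := dp'.2.2.2.1
    rw [← h] at hmul
    nlinarith
  · -- n / i = i', so n = i * i' with i < i' ≤ r
    have hmul : i * (n / i) = n := dp.2.2.2.1
    rw [h] at hmul
    nlinarith
  · -- n / i = n / i' forces i = i'
    have : i = i' := by
      have e1 : n / (n / i) = i := dp.2.2.2.2
      have e2 : n / (n / i') = i' := dp'.2.2.2.2
      rw [h] at e1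
      omega
    omega

lemma nodup_L (n : Int) (hn : 0 < n) :
    (((PySem.List.pyRange 1 ((Nat.sqrt n.toNat : Int) + 1) 1).map (blk n)).flatten).Nodup := by
  have hb := sqrt_bounds n hn
  apply List.nodup_flatten.mpr
  constructor
  · intro l hl
    rcases List.mem_map.mp hl with ⟨i, hi, rfl⟩
    have hi1 : 1 ≤ i := (PySem.List.mem_pyRange_one.mp hi).1
    unfold blk
    split_ifs with hm he
    · exact List.nodup_singleton _
    · refine List.nodup_cons.mpr ⟨?_, List.nodup_singleton _⟩
      simp only [List.mem_singleton]
      exact he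
    · exact List.nodup_nil
  · apply List.pairwise_map.mpr
    have hp := PySem.List.pairwise_lt_pyRange_one 1 ((Nat.sqrt n.toNat : Int) + 1)
    refine List.Pairwise.imp_of_mem ?_ hp
    intro a b ha hb' hlt
    have ha1 : 1 ≤ a := (PySem.List.mem_pyRange_one.mp ha).1
    have hb1 : b < (Nat.sqrt n.toNat : Int) + 1 := (PySem.List.mem_pyRange_one.mp hb').2
    exact blk_disjoint hn hb.1 ha1 hlt (by omega)

lemma mem_L (n : Int) (hn : 0 < n) (d : Int) :
    (d ∈ (((PySem.List.pyRange 1 ((Nat.sqrt n.toNat : Int) + 1) 1).map (blk n)).flatten)) ↔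
      (1 ≤ d ∧ d ≤ n ∧ d ∣ n) := by
  have hb := sqrt_bounds n hn
  set r : Int := (Nat.sqrt n.toNat : Int) with hr
  constructor
  · intro hd
    rcases List.mem_flatten.mp hd with ⟨l, hl, hdl⟩
    rcases List.mem_map.mp hl with ⟨i, hi, rfl⟩
    have hi1 : 1 ≤ i := (PySem.List.mem_pyRange_one.mp hi).1
    have hi2 : i < r + 1 := (PySem.List.mem_pyRange_one.mp hi).2
    rw [mem_blk (by omega)] at hdl
    obtain ⟨hdvd, hcase⟩ := hdl
    have dp := divisor_pair hn hdvd (by omega)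
    rcases hcase with rfl | rfl
    · exact ⟨hi1, by nlinarith [hb.1], hdvd⟩
    · exact ⟨by omega, dp.2.1, dp.2.2.1⟩
  · rintro ⟨h1, h2, hdvd⟩
    have dp := divisor_pair hn hdvd (by omega)
    apply List.mem_flatten.mpr
    by_cases hdr : d ≤ r
    · refine ⟨blk n d, List.mem_map_of_mem (PySem.List.mem_pyRange_one.mpr ⟨h1, by omega⟩), ?_⟩
      exact (mem_blk (by omega)).mpr ⟨hdvd, Or.inl rfl⟩
    · have hc : n / d ≤ r := by
        by_contra hcon
        have hcon' := lt_of_not_ge hcon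
        nlinarith [hb.2, dp.2.2.2.1]
      refine ⟨blk n (n / d),
        List.mem_map_of_mem (PySem.List.mem_pyRange_one.mpr ⟨by omega, by omega⟩), ?_⟩
      exact (mem_blk (by omega)).mpr ⟨dp.2.2.1, Or.inr dp.2.2.2.2.symm⟩

lemma blk_perm (n : Int) (hn : 0 < n) :
    (((PySem.List.pyRange 1 ((Nat.sqrt n.toNat : Int) + 1) 1).map (blk n)).flatten).Perm
      ((PySem.List.pyRange 1 (n + 1) 1).filter (fun i => PySem.Int.mod n i == 0)) := by
  apply (List.perm_ext_iff_of_nodup (nodup_L n hn)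
    ((PySem.List.nodup_pyRange_one 1 (n + 1)).filter _)).mpr
  intro d
  rw [mem_L n hn d, List.mem_filter, PySem.List.mem_pyRange_one]
  constructor
  · rintro ⟨h1, h2, hdvd⟩
    exact ⟨⟨h1, by omega⟩, by simp [PySem.Int.mod_eq_zero_iff_dvd, hdvd]⟩
  · rintro ⟨⟨h1, h2⟩, hm⟩
    refine ⟨h1, by omega, ?_⟩
    simpa [PySem.Int.mod_eq_zero_iff_dvd] using hm

lemma isPS_eq_sqCheck (d : Int) (hd : 0 ≤ d) : isPS d = sqCheck d := by
  unfold isPS sqCheck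
  cases hsq : (((Nat.sqrt d.toNat : Int)) ^ 2 == d)
  · apply List.any_eq_false.mpr
    intro i hi
    have h0 : 0 ≤ i := (PySem.List.mem_pyRange_one.mp hi).1
    simp only [beq_iff_eq]
    intro hc
    have hit : ((i.toNat : Int)) = i := Int.toNat_of_nonneg h0
    have h2 : ((i.toNat ^ 2 : Nat) : Int) = d := by push_cast; rw [hit]; exact hc
    have hnat : d.toNat = i.toNat ^ 2 := by omega
    have hroot : Nat.sqrt d.toNat = i.toNat := by rw [hnat, Nat.sqrt_eq']
    rw [hroot] at hsq
    simp only [beq_eq_false_iff_ne, ne_eq] at hsq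
    exact hsq (by rw [hit]; exact hc)
  · apply List.any_eq_true.mpr
    have heq : ((Nat.sqrt d.toNat : Int)) ^ 2 = d := by simpa using hsq
    refine ⟨(Nat.sqrt d.toNat : Int), ?_, by simp [heq]⟩
    apply PySem.List.mem_pyRange_one.mpr
    have hc : ceilSqrtF d = (Nat.sqrt d.toNat : Int) := by
      unfold ceilSqrtF
      rw [if_pos (by nlinarith [heq])]
    constructor
    · positivity
    · rw [hc]; omega

lemma bad_congr (f : Int) (hf : 0 < f) : pBadA f = pBadB f := by
  rcases PySem.Int.mod_two_eq f with h | h <;>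
    simp only [pBadA, pBadB, pOdd, h, isPS_eq_sqCheck f hf.le] <;> simp

lemma any_bad_congr (l : List Int) (h : ∀ f ∈ l, 0 < f) :
    l.any pBadA = l.any pBadB := by
  induction l with
  | nil => rfl
  | cons x xs ih =>
    simp only [List.any_cons]
    rw [bad_congr x (h x (by simp)), ih (fun f hf => h f (by simp [hf]))]

theorem isEN_spec : Claim_equal_isEN := by
  intro n _
  unfold Spec_isEN
  by_cases h : n ≤ 0 ∨ PySem.Int.mod n 2 = 1
  · unfold isEN isEN_alt
    rw [if_pos h, if_pos h]
  · have hn : 0 < n := by by_contra hc; exact h (Or.inl (by omega))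
    unfold isEN isEN_alt
    rw [if_neg h, if_neg h]
    simp only [alt_fold_eq_blk]
    simp only [pairStep_char]
    simp only [getFactors_eq_filter]
    simp only [oe_char]
    set F := (PySem.List.pyRange 1 (n + 1) 1).filter (fun i => PySem.Int.mod n i == 0) with hF
    set L := ((PySem.List.pyRange 1 ((Nat.sqrt n.toNat : Int) + 1) 1).map (blk n)).flatten with hL
    have hperm : L.Perm F := blk_perm n hn
    have hlen : L.length = F.length := hperm.length_eq
    have hodd : (L.filter pOdd).sum = (F.filter pOdd).sum := (hperm.filter pOdd).sum_eq
    have heven : (L.filter (pEven n)).sum = (F.filter (pEven n)).sum := (hperm.filter (pEven n)).sum_eq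
    have hany : L.any pBadB = F.any pBadB := hperm.any_eq
    have hpos : ∀ f ∈ F, 0 < f := by
      intro f hf
      have := (PySem.List.mem_pyRange_one.mp (List.mem_of_mem_filter hf)).1
      omega
    have hbad : F.any (fun f => f != 1 && PySem.Int.mod f 2 == 1 && isPS f) = F.any pBadB := by
      rw [show (fun f => f != 1 && PySem.Int.mod f 2 == 1 && isPS f) = pBadA from rfl]
      exact any_bad_congr F hpos
    simp only [List.nil_append, hlen, hodd, heven, hany, hbad, zero_add, Bool.true_and]
    by_cases c1 : F.length < 10
    · have c1' : ¬ (10 ≤ (F.length : Int)) := by omega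
      simp [c1, c1']
    · have c1' : (10 ≤ (F.length : Int)) := by omega
      by_cases c2 : (F.filter pOdd).sum ≤ (F.filter (pEven n)).sum
      · have c2' : ¬ ((F.filter (pEven n)).sum < (F.filter pOdd).sum) := by omega
        simp [c1, c2, c1', c2']
      · have c2' : ((F.filter (pEven n)).sum < (F.filter pOdd).sum) := by omega
        simp [c1, c2, c1', c2']
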